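-- pv_equiv track=rewrite | github.com/pypi-data/pypi-mirror-334 | packages/polars_expr_transformer/polars_expr_transformer-0.4.4.0.tar.gz/polars_expr_transformer-0.4.4.0/polars_expr_transformer/utils/utils.py | replace_double_minus
-- ===== SOURCE A (Python) =====
-- from typing import Tuple, Dict, List
--
-- def replace_double_minus(toks: List[str]) -> List[str]:
--     new_toks = []
--     i = 0
--     while i < len(toks):
--         if i < len(toks) - 1 and toks[i] == '-' and toks[i + 1] == '-':
--             new_toks.append('+')
--             i += 2  # Skip the next index
--         else:
--             new_toks.append(toks[i])
--             i += 1
--     return new_toks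
-- ===== SOURCE B (Python) =====
-- from itertools import groupby
--
-- def replace_double_minus(toks):
--     out = []
--     for key, grp in groupby(toks):
--         if key != '-':
--             out.extend(grp)
--         else:
--             m = len(list(grp))
--             out.extend(['+'] * (m // 2))
--             if m % 2 == 1:
--                 out.append('-')
--     return out
-- ===== Notes on version B (the rewrite author's own statement) =====
-- stated objective: idiomatic
-- what changed: Replaces the index-skipping while-loop with an itertools.groupby run-length grouping: each maximal run of m '-' tokens is emitted as m//2 '+' plus an optional trailing '-', other runs pass through unchanged.
import Mathlib
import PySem

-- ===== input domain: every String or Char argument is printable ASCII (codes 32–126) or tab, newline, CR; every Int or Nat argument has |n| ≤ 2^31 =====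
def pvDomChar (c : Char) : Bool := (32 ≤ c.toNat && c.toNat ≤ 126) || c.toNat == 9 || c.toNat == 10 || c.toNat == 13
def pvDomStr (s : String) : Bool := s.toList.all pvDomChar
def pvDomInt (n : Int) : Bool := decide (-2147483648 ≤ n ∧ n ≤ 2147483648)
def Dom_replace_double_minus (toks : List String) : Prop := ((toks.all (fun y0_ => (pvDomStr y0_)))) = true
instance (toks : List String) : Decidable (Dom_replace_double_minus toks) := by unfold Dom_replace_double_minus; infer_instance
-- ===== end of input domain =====

-- B replaces A's index-skipping while-loop by an itertools.groupby run-length pass: same O(n) cost, more idiomatic decomposition.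
-- ===== PORT A =====
-- literal transliteration of A's while loop: take two tokens when both are '-', else one
def replace_double_minus (toks : List String) : List String :=
  match toks with
  | [] => []
  | t :: rest =>
    if t = "-" ∧ rest.head? = some "-" then
      "+" :: replace_double_minus rest.tail
    else
      t :: replace_double_minus rest
termination_by toks.length
decreasing_by
  · simp only [List.length_cons, List.length_tail]; omega
  · simp only [List.length_cons]; omega

-- ===== PORT B =====
-- B: group into maximal runs of equal tokens (groupby), emit minus runs as m/2 '+' plus optional '-'
def replace_double_minus_alt (toks : List String) : List String :=
  match toks with
  | [] => []
  | t :: rest =>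
    let grp := rest.takeWhile (fun x => x = t)
    let rest' := rest.dropWhile (fun x => x = t)
    (if t = "-" then
       List.replicate ((grp.length + 1) / 2) "+" ++
         (if (grp.length + 1) % 2 = 1 then ["-"] else [])
     else t :: grp) ++ replace_double_minus_alt rest'
termination_by toks.length
decreasing_by
  simp only [List.length_cons]
  exact Nat.lt_succ_of_le (List.length_dropWhile_le _ _)

-- ===== PRECONDITION & SPEC =====
def Spec_replace_double_minus (toks : List String) (out : List String) : Prop := out = replace_double_minus_alt toks
instance (toks : List String) (out : List String) : Decidable (Spec_replace_double_minus toks out) := by unfold Spec_replace_double_minus; infer_instance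

-- ===== CLAIM (what is proved, stated in full; the proofs are below) =====
def Claim_equal_replace_double_minus : Prop := ∀ (toks : List String), Dom_replace_double_minus toks → Spec_replace_double_minus toks (replace_double_minus toks)

-- ===== LEMMAS AND PROOFS =====

-- A on a single non-pair step
theorem rdm_step_one (t : String) (rest : List String)
    (h : ¬ (t = "-" ∧ rest.head? = some "-")) :
    replace_double_minus (t :: rest) = t :: replace_double_minus rest := by
  rw [replace_double_minus]
  simp [h]

theorem rdm_step_two (rest : List String) :
    replace_double_minus ("-" :: "-" :: rest) = "+" :: replace_double_minus rest := by
  rw [replace_double_minus]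
  simp

-- A on a run of k minuses followed by rest not starting with '-'
theorem rdm_minus_run (k : Nat) (rest : List String) (h : rest.head? ≠ some "-") :
    replace_double_minus (List.replicate k "-" ++ rest) =
      List.replicate (k / 2) "+" ++ (if k % 2 = 1 then ["-"] else []) ++ replace_double_minus rest := by
  induction k using Nat.strong_induction_on with
  | _ k ih =>
    match k with
    | 0 => simp
    | 1 =>
      simp only [List.replicate_succ, List.replicate_zero, List.cons_append, List.nil_append]
      rw [rdm_step_one "-" rest (by simp [h])]
      simp
    | (m+2) =>
      have he : List.replicate (m+2) "-" ++ rest = "-" :: "-" :: (List.replicate m "-" ++ rest) := by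
        simp [List.replicate_succ]
      rw [he, rdm_step_two, ih m (by omega)]
      have h2 : (m+2) / 2 = m / 2 + 1 := by omega
      have h3 : (m+2) % 2 = m % 2 := by omega
      rw [h2, h3]
      simp [List.replicate_succ]

-- A on a run of non-minus tokens: copied through
theorem rdm_other_run (k : Nat) (t : String) (ht : t ≠ "-") (rest : List String) :
    replace_double_minus (List.replicate k t ++ rest) =
      List.replicate k t ++ replace_double_minus rest := by
  induction k with
  | zero => simp
  | succ m ih =>
    have he : List.replicate (m+1) t ++ rest = t :: (List.replicate m t ++ rest) := by
      simp [List.replicate_succ]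
    rw [he, rdm_step_one t _ (by simp [ht]), ih]
    simp [List.replicate_succ]

theorem rdm_takeWhile_replicate (t : String) (l : List String) :
    l.takeWhile (fun x => x = t) = List.replicate (l.takeWhile (fun x => x = t)).length t := by
  induction l with
  | nil => simp
  | cons a l ih =>
    by_cases h : a = t
    · subst h
      have hc : List.takeWhile (fun x => decide (x = a)) (a :: l) =
          a :: List.takeWhile (fun x => decide (x = a)) l := by
        simp
      rw [hc, List.length_cons, List.replicate_succ, List.cons_inj_right]
      exact ih
    · simp [h]

theorem rdm_head_dropWhile (t : String) (l : List String) :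
    (l.dropWhile (fun x => x = t)).head? ≠ some t := by
  intro h
  have := List.head?_dropWhile_not (p := fun x => decide (x = t)) (l := l)
  simp only [h] at this
  simp at this

theorem rdm_agree_len (n : Nat) : ∀ (toks : List String), toks.length ≤ n →
    replace_double_minus toks = replace_double_minus_alt toks := by
  induction n with
  | zero =>
    intro toks h
    have : toks = [] := List.eq_nil_of_length_eq_zero (Nat.le_zero.mp h)
    subst this; simp [replace_double_minus, replace_double_minus_alt]
  | succ n ih =>
    intro toks h
    match toks with
    | [] => simp [replace_double_minus, replace_double_minus_alt]
    | t :: rest =>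
      rw [replace_double_minus_alt]
      have hsplit : rest = rest.takeWhile (fun x => x = t) ++ rest.dropWhile (fun x => x = t) :=
        (List.takeWhile_append_dropWhile).symm
      have hlen : (rest.dropWhile (fun x => x = t)).length ≤ n := by
        have := List.length_dropWhile_le (fun x => decide (x = t)) rest
        simp only [List.length_cons] at h
        omega
      have hrec := ih (rest.dropWhile (fun x => x = t)) hlen
      by_cases ht : t = "-"
      · subst ht
        rw [if_pos rfl]
        have hcons : "-" :: rest =
            List.replicate ((rest.takeWhile (fun x => x = "-")).length + 1) "-" ++
              rest.dropWhile (fun x => x = "-") := by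
          rw [List.replicate_succ, List.cons_append, List.cons_inj_right]
          conv_lhs => rw [hsplit]
          conv_lhs => rw [rdm_takeWhile_replicate "-" rest]
        rw [hcons, rdm_minus_run _ _ (rdm_head_dropWhile "-" rest), hrec]
      · rw [if_neg ht]
        have hcons : t :: rest =
            List.replicate ((rest.takeWhile (fun x => x = t)).length + 1) t ++
              rest.dropWhile (fun x => x = t) := by
          rw [List.replicate_succ, List.cons_append, List.cons_inj_right]
          conv_lhs => rw [hsplit]
          conv_lhs => rw [rdm_takeWhile_replicate t rest]
        rw [hcons, rdm_other_run _ t ht, hrec]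
        simp only [List.replicate_succ, List.cons_append]
        rw [← rdm_takeWhile_replicate t rest]

-- ===== VERDICT (by name: the statement is the Claim_ definition above) =====
theorem replace_double_minus_spec : Claim_equal_replace_double_minus := by
  intro toks _
  unfold Spec_replace_double_minus
  exact rdm_agree_len toks.length toks le_rfl
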